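-- pv_equiv track=rewrite | github.com/CristopherBarrios/Proyecto1-Disenio-de-Lenguajes | functions.py | getRegExUniqueTokens
-- ===== SOURCE A (Python) =====
-- def getRegExUniqueTokens(postfix_regex,words=False):
--     '''
--     Funcion que obtiene los tokens unicos o el lenguaje de una expresion regular en formato postfix.
--     '''
--     ops = '*|.#'
--     tokens = []
--     for i in range(len(postfix_regex)):
--         token = postfix_regex[i]
--         op_exist = token in ops
--         if(op_exist == False):
--             tokens.append(token)
--
--     return list(dict.fromkeys(tokens))
-- ===== SOURCE B (Python) =====
-- def getRegExUniqueTokens(postfix_regex, words=False):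
--     '''
--     Recursive: the first character heads the result (unless it is an
--     operator), and the recursion proceeds on the rest of the string with
--     every later occurrence of that character deleted, so no seen-set or
--     dedup pass is needed.
--     '''
--     if not postfix_regex:
--         return []
--     c = postfix_regex[0]
--     rest = getRegExUniqueTokens(postfix_regex[1:].replace(c, ''), words)
--     return rest if c in '*|.#' else [c] + rest
-- ===== Notes on version B (the rewrite author's own statement) =====
-- stated objective: alternative
-- what changed: B replaces A's loop-then-dict.fromkeys pipeline with a recursion on the string: the head character (if not an operator) heads the result and the recursion continues on the tail with all later occurrences of that character deleted by str.replace, so no auxiliary dedup structure exists at all.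
import Mathlib
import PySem

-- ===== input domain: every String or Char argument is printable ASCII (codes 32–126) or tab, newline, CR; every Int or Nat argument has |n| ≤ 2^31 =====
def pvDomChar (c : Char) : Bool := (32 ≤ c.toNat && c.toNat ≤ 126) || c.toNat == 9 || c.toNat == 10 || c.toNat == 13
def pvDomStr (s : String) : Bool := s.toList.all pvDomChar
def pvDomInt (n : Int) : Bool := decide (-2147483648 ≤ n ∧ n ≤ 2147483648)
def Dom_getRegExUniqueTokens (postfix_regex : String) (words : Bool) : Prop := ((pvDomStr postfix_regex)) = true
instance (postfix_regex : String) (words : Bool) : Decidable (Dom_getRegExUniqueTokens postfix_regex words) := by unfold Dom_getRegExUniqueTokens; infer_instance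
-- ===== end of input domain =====

-- B replaces A's loop + dict.fromkeys dedup with a recursion that deletes later occurrences of the head character (objective: alternative decomposition, same results).

-- ===== PORT A =====
def getRegExUniqueTokens (postfix_regex : String) (words : Bool) : List String :=
  let ops : String := "*|.#"
  let tokens : List String :=
    (PySem.List.pyRange 0 (PySem.Str.len postfix_regex) 1).foldl
      (fun tokens i =>
        match PySem.Str.pyGet? postfix_regex i with
        | none => tokens          -- unreachable: i ∈ range(len(postfix_regex))
        | some c =>
          let token := String.ofList [c]
          let op_exist := PySem.Str.isIn token ops
          if op_exist == false then tokens ++ [token] else tokens)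
      []
  PySem.List.dedup tokens

-- ===== PORT B =====
-- recursion of Source B on the character list: s[1:].replace(c, '') is rest.filter (· != c)
def pvAltGo : List Char → List String
  | [] => []
  | c :: rest =>
    let restRes := pvAltGo (rest.filter (fun d => d != c))
    if PySem.Str.isIn (String.ofList [c]) "*|.#" then restRes
    else String.ofList [c] :: restRes
termination_by cs => cs.length
decreasing_by
  simp only [List.length_cons, List.length_unattach]
  exact Nat.lt_succ_of_le (le_trans (List.length_filter_le _ _) (by simp))

def getRegExUniqueTokens_alt (postfix_regex : String) (words : Bool) : List String :=
  pvAltGo postfix_regex.toList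

-- ===== PRECONDITION & SPEC =====
def Spec_getRegExUniqueTokens (postfix_regex : String) (words : Bool) (out : List String) : Prop := out = getRegExUniqueTokens_alt postfix_regex words
instance (postfix_regex : String) (words : Bool) (out : List String) : Decidable (Spec_getRegExUniqueTokens postfix_regex words out) := by unfold Spec_getRegExUniqueTokens; infer_instance

-- ===== CLAIM (what is proved, stated in full; the proofs are below) =====
def Claim_equal_getRegExUniqueTokens : Prop := ∀ (postfix_regex : String) (words : Bool), Dom_getRegExUniqueTokens postfix_regex words → Spec_getRegExUniqueTokens postfix_regex words (getRegExUniqueTokens postfix_regex words)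

-- ===== LEMMAS AND PROOFS =====

-- the one-character step A's pipeline reduces to (filter + dedup as a Set fold)
def pvStep (s : PySem.Set String) (c : Char) : PySem.Set String :=
  if PySem.Str.isIn (String.ofList [c]) "*|.#" then s else PySem.Set.add s (String.ofList [c])

-- A's index loop over range(len(s)) equals a structural fold over the characters
theorem pvA_loop (s : String) {α : Type} (f : α → Char → α) :
    ∀ (k a : ℕ) (acc : α), a + k = s.toList.length →
      (PySem.List.pyRange (a : Int) (s.toList.length : Int) 1).foldl
        (fun acc i => match PySem.Str.pyGet? s i with
          | none => acc
          | some c => f acc c) acc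
      = (s.toList.drop a).foldl f acc := by
  intro k
  induction k with
  | zero =>
    intro a acc ha
    rw [PySem.List.pyRange_one_eq_nil (by omega)]
    rw [List.drop_of_length_le (by omega)]
    rfl
  | succ k ih =>
    intro a acc ha
    have hlt : a < s.toList.length := by omega
    rw [PySem.List.pyRange_one_cons (by exact_mod_cast hlt)]
    have hget : PySem.Str.pyGet? s (a : Int) = some (s.toList[a]'hlt) := by
      simp [List.getElem?_eq_getElem hlt]
    rw [List.drop_eq_getElem_cons hlt]
    simp only [List.foldl_cons, hget]
    have : ((a : Int) + 1) = ((a + 1 : ℕ) : Int) := by push_cast; ring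
    rw [this, ih (a + 1) (f acc (s.toList[a]'hlt)) (by omega)]

-- A's result is the pvStep fold
theorem pvA_eq (s : String) (words : Bool) :
    getRegExUniqueTokens s words = s.toList.foldl pvStep [] := by
  unfold getRegExUniqueTokens
  simp only []
  have h1 : (PySem.List.pyRange 0 (PySem.Str.len s) 1).foldl
      (fun tokens i => match PySem.Str.pyGet? s i with
        | none => tokens
        | some c =>
          if PySem.Str.isIn (String.ofList [c]) "*|.#" == false
          then tokens ++ [String.ofList [c]] else tokens) ([] : List String)
      = s.toList.foldl
        (fun tokens c =>
          if PySem.Str.isIn (String.ofList [c]) "*|.#" == false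
          then tokens ++ [String.ofList [c]] else tokens) [] := by
    have := pvA_loop s
      (f := fun tokens c =>
        if PySem.Str.isIn (String.ofList [c]) "*|.#" == false
        then tokens ++ [String.ofList [c]] else tokens)
      s.toList.length 0 [] (by omega)
    simpa [PySem.Str.len_eq] using this
  rw [h1]
  rw [PySem.List.foldl_append_if
    (p := fun c => PySem.Str.isIn (String.ofList [c]) "*|.#" == false)
    (f := fun c => String.ofList [c])]
  rw [PySem.List.dedup_eq_ofList, PySem.Set.ofList_eq_foldl, List.nil_append]
  rw [List.foldl_map]
  rw [← PySem.List.foldl_if_eq_foldl_filter]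
  apply List.foldl_ext
  intro acc c _
  by_cases h : PySem.Chars.isIn [c] ['*', '|', '.', '#'] = true
  · simp [pvStep, PySem.Str.isIn_eq, h]
  · simp only [Bool.not_eq_true] at h
    simp [pvStep, PySem.Str.isIn_eq, h]

-- the one-constructor unfolding of pvAltGo
theorem pvAltGo_cons (c : Char) (rest : List Char) :
    pvAltGo (c :: rest)
      = if PySem.Str.isIn (String.ofList [c]) "*|.#"
        then pvAltGo (rest.filter (fun d => d != c))
        else String.ofList [c] :: pvAltGo (rest.filter (fun d => d != c)) := by
  rw [pvAltGo]

-- pvAltGo ignores occurrences of an operator character entirely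
theorem pvAltGo_filter_op (c : Char)
    (hc : PySem.Str.isIn (String.ofList [c]) "*|.#" = true) :
    ∀ (n : ℕ) (l : List Char), l.length ≤ n →
      pvAltGo (l.filter (fun d => d != c)) = pvAltGo l := by
  intro n
  induction n with
  | zero =>
    intro l hl
    have : l = [] := List.eq_nil_of_length_eq_zero (by omega)
    subst this; rfl
  | succ n ih =>
    intro l hl
    match l with
    | [] => rfl
    | d :: l' =>
      by_cases hdc : d = c
      · subst hdc
        simp only [List.filter_cons, bne_self_eq_false, Bool.false_eq_true, if_false]
        rw [pvAltGo_cons, if_pos hc]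
      · have hbd : (d != c) = true := by simp [bne, hdc]
        simp only [List.filter_cons, hbd, if_true]
        rw [pvAltGo_cons, pvAltGo_cons]
        have hcomm : (l'.filter (fun e => e != c)).filter (fun e => e != d)
            = (l'.filter (fun e => e != d)).filter (fun e => e != c) := by
          simp [List.filter_filter, Bool.and_comm]
        rw [hcomm, ih (l'.filter (fun e => e != d))
          (le_trans (List.length_filter_le _ _) (by simpa using hl))]

-- the fold with any accumulator equals the accumulator ++ pvAltGo of the not-yet-seen characters
theorem pvFold_eq_altGo :
    ∀ (cs : List Char) (acc : List String),
      cs.foldl pvStep acc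
        = acc ++ pvAltGo (cs.filter
            (fun c => !(PySem.Set.contains acc (String.ofList [c])))) := by
  intro cs
  induction cs with
  | nil => intro acc; simp [pvAltGo]
  | cons c cs' ih =>
    intro acc
    simp only [List.foldl_cons, List.filter_cons]
    by_cases hop : PySem.Str.isIn (String.ofList [c]) "*|.#" = true
    · -- operator: pvStep drops it; on the right it may survive the filter but pvAltGo drops it
      have hstep : pvStep acc c = acc := by unfold pvStep; rw [if_pos hop]
      rw [hstep, ih acc]
      by_cases hmem : PySem.Set.contains acc (String.ofList [c]) = true
      · rw [hmem]; simp
      · simp only [Bool.not_eq_true] at hmem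
        rw [hmem]
        simp only [Bool.not_false, if_true]
        rw [pvAltGo_cons, if_pos hop]
        congr 1
        exact (pvAltGo_filter_op c hop (cs'.filter
          (fun d => !(PySem.Set.contains acc (String.ofList [d])))).length _ le_rfl).symm
    · have hop' : PySem.Str.isIn (String.ofList [c]) "*|.#" = false := by
        simpa using hop
      have hopC : PySem.Chars.isIn [c] ['*', '|', '.', '#'] = false := by
        simpa [PySem.Str.isIn_eq] using hop'
      by_cases hmem : PySem.Set.contains acc (String.ofList [c]) = true
      · -- already seen: pvStep leaves acc unchanged, the filter drops c
        have hstep : pvStep acc c = acc := by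
          unfold pvStep
          rw [if_neg (by simp [hopC]), PySem.Set.add, if_pos hmem]
        rw [hstep, ih acc, hmem]
        simp
      · -- new non-operator: appended on the left, heads pvAltGo on the right
        have hmem' : PySem.Set.contains acc (String.ofList [c]) = false := by
          simpa using hmem
        have hstep : pvStep acc c = acc ++ [String.ofList [c]] := by
          unfold pvStep
          have hmemM : String.ofList [c] ∉ acc := by
            simpa [PySem.Set.contains] using hmem'
          rw [if_neg (by simp [hopC]), PySem.Set.add, if_neg (by simp [hmemM])]
        rw [hstep, ih (acc ++ [String.ofList [c]]), hmem']
        simp only [Bool.not_false, if_true]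
        rw [pvAltGo_cons, if_neg (by simp [hopC, PySem.Str.isIn_eq])]
        rw [List.append_assoc, List.singleton_append]
        have hfeq : (cs'.filter
              (fun d => !(PySem.Set.contains (acc ++ [String.ofList [c]]) (String.ofList [d]))))
            = (cs'.filter
                (fun d => !(PySem.Set.contains acc (String.ofList [d])))).filter
                (fun d => d != c) := by
          rw [List.filter_filter]
          apply List.filter_congr
          intro d _
          by_cases hdc : d = c
          · subst hdc
            have h3 : PySem.Set.contains (acc ++ [String.ofList [d]]) (String.ofList [d]) = true := by
              simp [PySem.Set.contains]
            rw [h3]; simp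
          · have h1 : String.ofList [d] ≠ String.ofList [c] := by
              intro he
              exact hdc (by simpa using congrArg String.toList he)
            have h2 : PySem.Set.contains (acc ++ [String.ofList [c]]) (String.ofList [d])
                = PySem.Set.contains acc (String.ofList [d]) := by
              simp [PySem.Set.contains, h1]
            have hb : (d != c) = true := by simp [bne, hdc]
            rw [h2, hb]
            simp
        rw [hfeq]

-- ===== VERDICT (by name: the statement is the Claim_ definition above) =====
theorem getRegExUniqueTokens_spec : Claim_equal_getRegExUniqueTokens := by
  intro s words _
  unfold Spec_getRegExUniqueTokens getRegExUniqueTokens_alt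
  rw [pvA_eq]
  rw [pvFold_eq_altGo s.toList []]
  simp [PySem.Set.contains]
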